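-- pv_equiv track=rewrite | github.com/chaselover/practiceAlgorithm | 13544 수열과쿼리3.py | infalte_tree
-- ===== SOURCE A (Python) =====
-- from math import ceil, log2
--
-- def infalte_tree(nodes):
--     height = ceil(log2(len(nodes)))
--     tree = [list() for _ in range(2 << height)]
--     end_layer = 1 << height
--
--     for seq, num in enumerate(nodes):
--         tree[end_layer + seq] = [num]
--
--     end_layer >>= 1
--     while end_layer:
--         for i in range(end_layer):
--             # 병합정렬
--             arr1_idx = arr2_idx = 0
--
--             while arr1_idx < len(tree[(end_layer + i) * 2]) and arr2_idx < len(tree[(end_layer + i) * 2 + 1]):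
--                 if tree[(end_layer + i) * 2][arr1_idx] < tree[(end_layer + i) * 2 + 1][arr2_idx]:
--                     tree[(end_layer + i)].append(tree[(end_layer + i) * 2][arr1_idx])
--                     arr1_idx += 1
--                 else:
--                     tree[(end_layer + i)].append(tree[(end_layer + i) * 2 + 1][arr2_idx])
--                     arr2_idx += 1
--
--             # 남은 원소 넣어주기
--             if arr1_idx != len(tree[(end_layer + i) * 2]):
--                 for e in range(arr1_idx, len(tree[(end_layer + i) * 2])):
--                     tree[(end_layer + i)].append(tree[(end_layer + i) * 2][e])
--
--             # 남은 원소 넣어주기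
--             if arr2_idx != len(tree[(end_layer + i) * 2 + 1]):
--                 for e in range(arr2_idx, len(tree[(end_layer + i) * 2 + 1])):
--                     tree[(end_layer + i)].append(tree[(end_layer + i) * 2 + 1][e])
--
--         end_layer >>= 1
--
--     return tree
-- ===== SOURCE B (Python) =====
-- def infalte_tree(nodes):
--     n = len(nodes)
--     height = (n - 1).bit_length() if n else 0
--     leaf0 = 1 << height
--     tree = [[]]
--     for j in range(1, 2 * leaf0):
--         d = height - (j.bit_length() - 1)
--         lo = (j << d) - leaf0
--         hi = min(((j + 1) << d) - leaf0, n)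
--         tree.append(sorted(nodes[lo:hi]))
--     return tree
-- ===== Notes on version B (the rewrite author's own statement) =====
-- stated objective: alternative
-- what changed: B does not build the tree bottom-up by merging children: for each node index j it computes the contiguous source range of leaves the node covers from j's bit length and sorts that slice of the input directly, appending the nodes in index order.
import Mathlib
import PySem

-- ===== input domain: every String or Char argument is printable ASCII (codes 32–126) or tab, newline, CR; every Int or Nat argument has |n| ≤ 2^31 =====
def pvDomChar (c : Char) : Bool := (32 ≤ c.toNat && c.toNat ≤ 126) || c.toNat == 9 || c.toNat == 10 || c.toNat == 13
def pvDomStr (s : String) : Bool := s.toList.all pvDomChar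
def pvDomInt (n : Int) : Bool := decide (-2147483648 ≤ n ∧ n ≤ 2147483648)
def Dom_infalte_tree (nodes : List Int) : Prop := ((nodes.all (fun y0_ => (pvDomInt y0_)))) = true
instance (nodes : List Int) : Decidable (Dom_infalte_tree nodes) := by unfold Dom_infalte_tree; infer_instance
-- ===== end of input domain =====

-- B computes each tree node directly as the sorted input slice covered by that node (read off
-- the node index's bit length), instead of A's bottom-up merging of child lists; same output.

-- ===== PORT A =====
-- A's inner while-loop over arr1_idx/arr2_idx appending into tree[end_layer+i]; the two
-- trailing 'remaining elements' for-loops append a[i:] resp. b[j:] (= drop).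
def pvMergeGo (a b : List Int) : Nat → Nat → Nat → List Int → List Int
  | 0, i, j, acc => acc ++ a.drop i ++ b.drop j
  | fuel + 1, i, j, acc =>
    if h : i < a.length ∧ j < b.length then
      if a[i] < b[j] then pvMergeGo a b fuel (i + 1) j (acc ++ [a[i]])
      else pvMergeGo a b fuel i (j + 1) (acc ++ [b[j]])
    else acc ++ a.drop i ++ b.drop j

-- the loop runs at most len(a) + len(b) times; the fuel only makes it structural
def pvMergeA (a b : List Int) (i j : Nat) (acc : List Int) : List Int :=
  pvMergeGo a b (a.length + b.length) i j acc

-- 'for i in range(end_layer):' merge the two children of node end_layer+i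
-- (tree[idx] is read as getD; the index is always in range in A).
def pvLevelA (el : Nat) (tree : List (List Int)) : List (List Int) :=
  (List.range el).foldl (fun t i =>
    t.set (el + i) (pvMergeA (t.getD (2 * (el + i)) []) (t.getD (2 * (el + i) + 1) []) 0 0 [])) tree

-- 'end_layer >>= 1; while end_layer: ... ; end_layer >>= 1'
def pvLoopGo : Nat → List (List Int) → Nat → List (List Int)
  | 0, tree, _ => tree
  | fuel + 1, tree, el => if el = 0 then tree else pvLoopGo fuel (pvLevelA el tree) (el / 2)

-- halving reaches 0 in at most el + 1 steps; the fuel only makes the loop structural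
def pvLoopA (tree : List (List Int)) (el : Nat) : List (List Int) :=
  pvLoopGo (el + 1) tree el

def infalte_tree (nodes : List Int) : List (List Int) :=
  -- height = ceil(log2(len(nodes))); Python raises ValueError on the empty list (outside Pre_)
  let height := Nat.clog 2 nodes.length
  let endLayer := 1 <<< height
  let tree0 := List.replicate (2 <<< height) ([] : List Int)
  -- 'for seq, num in enumerate(nodes): tree[end_layer + seq] = [num]'
  let tree1 := nodes.zipIdx.foldl (fun t p => t.set (endLayer + p.2) [p.1]) tree0
  pvLoopA tree1 (endLayer >>> 1)

-- ===== PORT B =====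
def infalte_tree_alt (nodes : List Int) : List (List Int) :=
  let n := nodes.length
  let height : Nat := if n = 0 then 0 else PySem.Int.bitLength ((n : Int) - 1)
  let leaf0 : Int := 1 <<< height
  (PySem.List.pyRange 1 (2 * leaf0)).foldl (fun t j =>
    let d : Nat := height - (PySem.Int.bitLength j - 1)
    let lo : Int := (j <<< d) - leaf0
    let hi : Int := min (((j + 1) <<< d) - leaf0) (n : Int)
    t ++ [PySem.List.sorted (PySem.List.slice nodes (some lo) (some hi)) (fun x => x)]) [[]]

-- ===== PRECONDITION & SPEC =====
-- Python A raises ValueError (log2 of 0) on the empty list; that is the only exclusion.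
def Pre_infalte_tree (nodes : List Int) : Prop := nodes ≠ []
instance (nodes : List Int) : Decidable (Pre_infalte_tree nodes) := by
  unfold Pre_infalte_tree; infer_instance

def pvWitness_infalte_tree : List Int := [3, 1, 2]

def Spec_infalte_tree (nodes : List Int) (out : List (List Int)) : Prop := out = infalte_tree_alt nodes
instance (nodes : List Int) (out : List (List Int)) : Decidable (Spec_infalte_tree nodes out) := by
  unfold Spec_infalte_tree; infer_instance

-- ===== CLAIM (what is proved, stated in full; the proofs are below) =====
def Claim_equal_infalte_tree : Prop := ∀ (nodes : List Int), Dom_infalte_tree nodes → Pre_infalte_tree nodes → Spec_infalte_tree nodes (infalte_tree nodes)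

-- ===== LEMMAS AND PROOFS =====

-- the (unsorted) source slice [a, b) of the input
def pvSlice (l : List Int) (a b : Nat) : List Int := (l.drop a).take (b - a)

-- the intended content of tree node j (j ≥ 1): the sorted slice of sources its leaves cover
def pvTj (l : List Int) (hh j : Nat) : List Int :=
  PySem.List.sorted (pvSlice l (j * 2 ^ (hh - (PySem.Int.bitLength (j : Int) - 1)) - 2 ^ hh)
    (min ((j + 1) * 2 ^ (hh - (PySem.Int.bitLength (j : Int) - 1)) - 2 ^ hh) l.length)) (fun x => x)

lemma pvBitLen (k j : Nat) (h1 : 2 ^ k ≤ j) (h2 : j < 2 ^ (k + 1)) :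
    PySem.Int.bitLength (j : Int) = k + 1 := by
  have hj0 : j ≠ 0 := by have : 1 ≤ 2 ^ k := Nat.one_le_two_pow; omega
  set bl := PySem.Int.bitLength (j : Int) with hbl
  have hlt : j < 2 ^ bl := by
    have := PySem.Int.lt_two_pow_bitLength (j : Int); simpa using this
  have hle : 2 ^ (bl - 1) ≤ j := by
    have := PySem.Int.two_pow_bitLength_le (j : Int) (by exact_mod_cast hj0)
    simpa using this
  rcases lt_trichotomy bl (k + 1) with h | h | h
  · exfalso
    have : (2 : Nat) ^ bl ≤ 2 ^ k := Nat.pow_le_pow_right (by norm_num) (by omega)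
    omega
  · exact h
  · exfalso
    have : (2 : Nat) ^ (k + 1) ≤ 2 ^ (bl - 1) := Nat.pow_le_pow_right (by norm_num) (by omega)
    omega

lemma pvHeightEq (n : Nat) (hn : 1 ≤ n) :
    PySem.Int.bitLength ((n : Int) - 1) = Nat.clog 2 n := by
  rcases Nat.eq_or_lt_of_le hn with h1 | h2
  · rw [← h1]
    have hc : Nat.clog 2 1 = 0 := by
      have := (Nat.clog_le_iff_le_pow (b := 2) (by norm_num) (x := 1) (y := 0)).mpr (by norm_num)
      omega
    norm_num [hc]
  · have hcast : (n : Int) - 1 = ((n - 1 : Nat) : Int) := by omega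
    rw [hcast]
    have hm1 : 1 ≤ n - 1 := by omega
    set bl := PySem.Int.bitLength ((n - 1 : Nat) : Int) with hbl
    have hlt : n - 1 < 2 ^ bl := by
      have := PySem.Int.lt_two_pow_bitLength ((n - 1 : Nat) : Int); simpa using this
    have hle : 2 ^ (bl - 1) ≤ n - 1 := by
      have := PySem.Int.two_pow_bitLength_le ((n - 1 : Nat) : Int)
        (by exact_mod_cast (by omega : n - 1 ≠ 0))
      simpa using this
    have hbl1 : 1 ≤ bl := by
      by_contra h
      have : bl = 0 := by omega
      rw [this] at hlt; simp at hlt; omega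
    have hup : Nat.clog 2 n ≤ bl := (Nat.clog_le_iff_le_pow (by norm_num)).mpr (by omega)
    have hdown : bl - 1 < Nat.clog 2 n := (Nat.lt_clog_iff_pow_lt (by norm_num)).mpr (by omega)
    omega

lemma pvMergeGo_eq (a b : List Int) : ∀ (fuel i j : Nat) (acc : List Int),
    a.length - i + (b.length - j) ≤ fuel →
    pvMergeGo a b fuel i j acc
      = acc ++ List.merge (a.drop i) (b.drop j) (fun x y => decide (x < y)) := by
  intro fuel
  induction fuel with
  | zero =>
    intro i j acc hf
    simp only [pvMergeGo]
    have hb : List.drop j b = [] := List.drop_eq_nil_of_le (by omega)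
    rw [List.drop_eq_nil_of_le (by omega), hb, List.nil_merge]
    simp
  | succ fuel ih =>
    intro i j acc hf
    simp only [pvMergeGo]
    by_cases h : i < a.length ∧ j < b.length
    · rw [dif_pos h]
      by_cases hlt : a[i] < b[j]
      · rw [if_pos hlt, ih (i + 1) j _ (by omega)]
        rw [List.drop_eq_getElem_cons h.1, List.drop_eq_getElem_cons h.2, List.cons_merge_cons]
        rw [if_pos (by simpa using hlt), ← List.drop_eq_getElem_cons h.2]
        simp
      · rw [if_neg hlt, ih i (j + 1) _ (by omega)]
        rw [List.drop_eq_getElem_cons h.1, List.drop_eq_getElem_cons h.2, List.cons_merge_cons]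
        rw [if_neg (by simpa using hlt), ← List.drop_eq_getElem_cons h.1]
        simp
    · rw [dif_neg h]
      rcases not_and_or.mp h with h' | h'
      · rw [List.drop_eq_nil_of_le (by omega), List.nil_merge]; simp
      · have hb : List.drop j b = [] := List.drop_eq_nil_of_le (by omega)
        rw [hb, List.merge_right]; simp

lemma pvMergeA_eq (a b : List Int) (i j : Nat) (acc : List Int) :
    pvMergeA a b i j acc = acc ++ List.merge (a.drop i) (b.drop j) (fun x y => decide (x < y)) :=
  pvMergeGo_eq a b (a.length + b.length) i j acc (by omega)

lemma pvLoopGo_congr : ∀ (f₁ : Nat), ∀ (f₂ : Nat) (tree : List (List Int)) (el : Nat),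
    el < f₁ → el < f₂ → pvLoopGo f₁ tree el = pvLoopGo f₂ tree el := by
  intro f₁
  induction f₁ with
  | zero => intro f₂ tree el h1 h2; omega
  | succ f₁ ih =>
    intro f₂ tree el h1 h2
    obtain ⟨g₂, rfl⟩ : ∃ g, f₂ = g + 1 := ⟨f₂ - 1, by omega⟩
    simp only [pvLoopGo]
    by_cases hel : el = 0
    · rw [if_pos hel, if_pos hel]
    · rw [if_neg hel, if_neg hel]
      exact ih g₂ (pvLevelA el tree) (el / 2) (by omega) (by omega)

lemma pvLoopA_unfold (tree : List (List Int)) (el : Nat) :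
    pvLoopA tree el = if el = 0 then tree else pvLoopA (pvLevelA el tree) (el / 2) := by
  unfold pvLoopA
  by_cases hel : el = 0
  · subst hel; rfl
  · simp only [pvLoopGo, if_neg hel]
    exact pvLoopGo_congr el (el / 2 + 1) (pvLevelA el tree) (el / 2) (by omega) (by omega)

lemma pvPairwiseMergeLt : ∀ (l₁ l₂ : List Int), l₁.Pairwise (· ≤ ·) → l₂.Pairwise (· ≤ ·) →
    (List.merge l₁ l₂ (fun x y => decide (x < y))).Pairwise (· ≤ ·)
  | [], l₂, _, h₂ => by simpa [List.nil_merge] using h₂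
  | x :: xs, [], h₁, _ => by simpa [List.merge_right] using h₁
  | x :: xs, y :: ys, h₁, h₂ => by
    rw [List.cons_merge_cons]
    by_cases hxy : x < y
    · rw [if_pos (by simpa using hxy), List.pairwise_cons]
      refine ⟨?_, pvPairwiseMergeLt xs (y :: ys) (List.pairwise_cons.mp h₁).2 h₂⟩
      intro z hz
      rcases List.mem_merge.mp hz with hz | hz
      · exact (List.pairwise_cons.mp h₁).1 z hz
      · rcases List.mem_cons.mp hz with rfl | hz
        · exact le_of_lt hxy
        · exact le_trans (le_of_lt hxy) ((List.pairwise_cons.mp h₂).1 z hz)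
    · rw [if_neg (by simpa using hxy), List.pairwise_cons]
      refine ⟨?_, pvPairwiseMergeLt (x :: xs) ys h₁ (List.pairwise_cons.mp h₂).2⟩
      intro z hz
      rcases List.mem_merge.mp hz with hz | hz
      · rcases List.mem_cons.mp hz with rfl | hz
        · exact not_lt.mp hxy
        · exact le_trans (not_lt.mp hxy) ((List.pairwise_cons.mp h₁).1 z hz)
      · exact (List.pairwise_cons.mp h₂).1 z hz
termination_by l₁ l₂ => l₁.length + l₂.length

lemma pvSlice_min (l : List Int) (a b : Nat) : pvSlice l a (min b l.length) = pvSlice l a b := by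
  unfold pvSlice
  rw [List.take_eq_take_min]
  conv_rhs => rw [List.take_eq_take_min]
  rw [List.length_drop]
  congr 1
  omega

lemma pvSlice_append (l : List Int) (a b c : Nat) (hab : a ≤ b) (hbc : b ≤ c) :
    pvSlice l a c = pvSlice l a b ++ pvSlice l b c := by
  unfold pvSlice
  rw [show c - a = (b - a) + (c - b) by omega, List.take_add]
  congr 2
  rw [List.drop_drop]
  congr 1
  omega

lemma pvTj_leaf (l : List Int) (hh s : Nat) (hs : s < 2 ^ hh) :
    pvTj l hh (2 ^ hh + s) = if h : s < l.length then [l[s]] else [] := by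
  unfold pvTj
  rw [pvBitLen hh (2 ^ hh + s) (by omega) (by rw [pow_succ]; omega)]
  simp only [Nat.add_sub_cancel, Nat.sub_self, pow_zero, mul_one]
  rw [show 2 ^ hh + s - 2 ^ hh = s by omega, show 2 ^ hh + s + 1 - 2 ^ hh = s + 1 by omega]
  by_cases h : s < l.length
  · rw [dif_pos h, show min (s + 1) l.length = s + 1 by omega]
    unfold pvSlice
    rw [show s + 1 - s = 1 by omega, List.drop_eq_getElem_cons h, List.take_succ_cons,
      List.take_zero]
    exact PySem.List.sorted_eq_self_of_pairwise _ _ (by simp)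
  · rw [dif_neg h, show min (s + 1) l.length = l.length by omega]
    unfold pvSlice
    rw [List.drop_eq_nil_of_le (by omega), List.take_nil]
    exact PySem.List.sorted_eq_self_of_pairwise _ _ (by simp)

lemma pvTj_merge (l : List Int) (hh k j : Nat) (h1 : 2 ^ k ≤ j) (h2 : j < 2 ^ (k + 1))
    (hk : k < hh) :
    pvMergeA (pvTj l hh (2 * j)) (pvTj l hh (2 * j + 1)) 0 0 [] = pvTj l hh j := by
  obtain ⟨d', hd'⟩ : ∃ d', hh - k = d' + 1 := ⟨hh - k - 1, by omega⟩
  have hbj : PySem.Int.bitLength (j : Int) = k + 1 := pvBitLen k j h1 h2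
  have hbl : PySem.Int.bitLength ((2 * j : Nat) : Int) = (k + 1) + 1 :=
    pvBitLen (k + 1) (2 * j) (by rw [pow_succ]; omega) (by rw [pow_succ, pow_succ]; omega)
  have hbr : PySem.Int.bitLength ((2 * j + 1 : Nat) : Int) = (k + 1) + 1 :=
    pvBitLen (k + 1) (2 * j + 1) (by rw [pow_succ]; omega) (by rw [pow_succ, pow_succ]; omega)
  unfold pvTj
  rw [hbj, hbl, hbr]
  simp only [Nat.add_sub_cancel]
  rw [show hh - (k + 1) = d' by omega, hd']
  rw [show j * 2 ^ (d' + 1) = 2 * j * 2 ^ d' by ring,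
    show (j + 1) * 2 ^ (d' + 1) = (2 * j + 1 + 1) * 2 ^ d' by ring]
  rw [pvSlice_min, pvSlice_min, pvSlice_min, pvMergeA_eq]
  simp only [List.drop_zero, List.nil_append]
  refine (PySem.List.sorted_id_eq_of_perm_of_pairwise _ _ ?_ ?_).symm
  · refine (List.merge_perm_append _).trans ?_
    refine ((PySem.List.sorted_perm _ _ _).append (PySem.List.sorted_perm _ _ _)).trans ?_
    rw [← pvSlice_append l (2 * j * 2 ^ d' - 2 ^ hh) ((2 * j + 1) * 2 ^ d' - 2 ^ hh)
      ((2 * j + 1 + 1) * 2 ^ d' - 2 ^ hh)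
      (Nat.sub_le_sub_right (Nat.mul_le_mul (by omega) (le_refl _)) _)
      (Nat.sub_le_sub_right (Nat.mul_le_mul (by omega) (le_refl _)) _)]
  · exact pvPairwiseMergeLt _ _ (PySem.List.sorted_pairwise _ _) (PySem.List.sorted_pairwise _ _)

lemma pvFoldLen {β : Type} (xs : List β) (pos : β → Nat) (val : List (List Int) → β → List Int) :
    ∀ t : List (List Int), (xs.foldl (fun t p => t.set (pos p) (val t p)) t).length = t.length := by
  induction xs with
  | nil => intro t; rfl
  | cons x xs ih => intro t; simp only [List.foldl_cons, ih, List.length_set]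

lemma pvInit (e : Nat) : ∀ (l : List Int) (s : Nat) (t : List (List Int)),
    e + s + l.length ≤ t.length → ∀ q,
    ((l.zipIdx s).foldl (fun t p => t.set (e + p.2) [p.1]) t)[q]? =
      if e + s ≤ q ∧ q < e + s + l.length then (l[q - (e + s)]?).map (fun v => [v]) else t[q]? := by
  intro l
  induction l with
  | nil =>
    intro s t hle q
    simp only [List.zipIdx_nil, List.foldl_nil, List.length_nil]
    rw [if_neg (by omega)]
  | cons x xs ih =>
    intro s t hle q
    simp only [List.length_cons] at hle ⊢
    simp only [List.zipIdx_cons, List.foldl_cons]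
    rw [ih (s + 1) (t.set (e + s) [x]) (by rw [List.length_set]; omega) q]
    by_cases hq1 : e + (s + 1) ≤ q ∧ q < e + (s + 1) + xs.length
    · rw [if_pos hq1, if_pos (by omega)]
      rw [show q - (e + s) = (q - (e + (s + 1))) + 1 by omega]
      rw [List.getElem?_cons_succ]
    · rw [if_neg hq1, List.getElem?_set]
      by_cases hq2 : e + s = q
      · rw [if_pos hq2, if_pos (by omega), if_pos (by omega)]
        rw [show q - (e + s) = 0 by omega]
        simp
      · rw [if_neg hq2, if_neg (by omega)]

lemma pvLevel_aux (tree : List (List Int)) (el : Nat) (hel : 2 * el ≤ tree.length) :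
    ∀ (m c : Nat) (t : List (List Int)), t.length = tree.length → c + m ≤ el →
    (∀ p, 2 * el ≤ p → t[p]? = tree[p]?) → ∀ q,
    ((List.range' c m).foldl (fun t i =>
        t.set (el + i) (pvMergeA (t.getD (2 * (el + i)) []) (t.getD (2 * (el + i) + 1) []) 0 0 [])) t)[q]? =
      if el + c ≤ q ∧ q < el + c + m then
        some (pvMergeA (tree.getD (2 * q) []) (tree.getD (2 * q + 1) []) 0 0 []) else t[q]? := by
  intro m
  induction m with
  | zero =>
    intro c t hlen hcm hagree q
    simp only [List.range'_zero, List.foldl_nil]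
    rw [if_neg (by omega)]
  | succ m ih =>
    intro c t hlen hcm hagree q
    simp only [List.range'_succ, List.foldl_cons]
    have hv : t.getD (2 * (el + c)) [] = tree.getD (2 * (el + c)) [] := by
      rw [List.getD_eq_getElem?_getD, List.getD_eq_getElem?_getD, hagree _ (by omega)]
    have hv2 : t.getD (2 * (el + c) + 1) [] = tree.getD (2 * (el + c) + 1) [] := by
      rw [List.getD_eq_getElem?_getD, List.getD_eq_getElem?_getD, hagree _ (by omega)]
    rw [hv, hv2]
    rw [ih (c + 1) (t.set (el + c)
        (pvMergeA (tree.getD (2 * (el + c)) []) (tree.getD (2 * (el + c) + 1) []) 0 0 []))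
      (by rw [List.length_set]; exact hlen) (by omega)
      (fun p hp => by rw [List.getElem?_set, if_neg (by omega)]; exact hagree p hp) q]
    by_cases h1 : el + (c + 1) ≤ q ∧ q < el + (c + 1) + m
    · rw [if_pos h1, if_pos (by omega)]
    · rw [if_neg h1, List.getElem?_set]
      by_cases h2 : el + c = q
      · rw [if_pos h2, if_pos (by omega), if_pos (by omega)]
        rw [h2]
      · rw [if_neg h2, if_neg (by omega)]

lemma pvLevelA_spec (l : List Int) (hh k : Nat) (hk : k < hh) (t : List (List Int))
    (hlen : t.length = 2 ^ (hh + 1))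
    (hchild : ∀ j, 2 ^ (k + 1) ≤ j → j < 2 ^ (hh + 1) → t[j]? = some (pvTj l hh j)) :
    (pvLevelA (2 ^ k) t).length = 2 ^ (hh + 1) ∧
    (∀ j, 2 ^ k ≤ j → j < 2 ^ (k + 1) → (pvLevelA (2 ^ k) t)[j]? = some (pvTj l hh j)) ∧
    (∀ j, j < 2 ^ k ∨ 2 ^ (k + 1) ≤ j → (pvLevelA (2 ^ k) t)[j]? = t[j]?) := by
  have hpow2 : (2 : Nat) ^ (k + 2) ≤ 2 ^ (hh + 1) := Nat.pow_le_pow_right (by norm_num) (by omega)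
  have he1 : 2 * 2 ^ k = 2 ^ (k + 1) := by rw [pow_succ]; ring
  have he2 : 2 * 2 ^ (k + 1) = 2 ^ (k + 2) := by rw [pow_succ 2 (k + 1)]; ring
  have hel : 2 * 2 ^ k ≤ t.length := by omega
  have haux := pvLevel_aux t (2 ^ k) hel (2 ^ k) 0 t rfl (by omega) (fun p _ => rfl)
  unfold pvLevelA
  rw [List.range_eq_range']
  refine ⟨?_, ?_, ?_⟩
  · exact (pvFoldLen (List.range' 0 (2 ^ k)) (fun i => 2 ^ k + i)
      (fun t i => pvMergeA (t.getD (2 * (2 ^ k + i)) []) (t.getD (2 * (2 ^ k + i) + 1) []) 0 0 [])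
      t).trans hlen
  · intro j hj1 hj2
    rw [haux j, if_pos (by omega)]
    have hc1 : t.getD (2 * j) [] = pvTj l hh (2 * j) := by
      rw [List.getD_eq_getElem?_getD, hchild (2 * j) (by omega) (by omega)]; rfl
    have hc2 : t.getD (2 * j + 1) [] = pvTj l hh (2 * j + 1) := by
      rw [List.getD_eq_getElem?_getD, hchild (2 * j + 1) (by omega) (by omega)]; rfl
    rw [hc1, hc2, pvTj_merge l hh k j hj1 hj2 hk]
  · intro j hj
    rw [haux j, if_neg (by omega)]

lemma pvLoop_inv (l : List Int) (hh : Nat) : ∀ (k : Nat) (t : List (List Int)), k < hh →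
    t.length = 2 ^ (hh + 1) →
    (∀ j, 2 ^ (k + 1) ≤ j → j < 2 ^ (hh + 1) → t[j]? = some (pvTj l hh j)) →
    (pvLoopA t (2 ^ k)).length = 2 ^ (hh + 1) ∧
    (∀ j, 1 ≤ j → j < 2 ^ (hh + 1) → (pvLoopA t (2 ^ k))[j]? = some (pvTj l hh j)) ∧
    (pvLoopA t (2 ^ k))[0]? = t[0]? := by
  intro k
  induction k with
  | zero =>
    intro t hk hlen hhyp
    have h1 : (2 : Nat) ^ 0 = 1 := pow_zero 2
    have h2 : (2 : Nat) ^ (0 + 1) = 2 := by norm_num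
    rw [pvLoopA_unfold, if_neg (by omega), show (2 : Nat) ^ 0 / 2 = 0 by norm_num,
      pvLoopA_unfold, if_pos rfl]
    obtain ⟨hL, hmid, hout⟩ := pvLevelA_spec l hh 0 hk t hlen hhyp
    refine ⟨hL, ?_, hout 0 (Or.inl (by omega))⟩
    intro j hj1 hj2
    by_cases hj : j < 2 ^ (0 + 1)
    · exact hmid j (by omega) hj
    · rw [hout j (Or.inr (by omega))]
      exact hhyp j (by omega) hj2
  | succ k ih =>
    intro t hk hlen hhyp
    have hpos : (0 : Nat) < 2 ^ (k + 1) := by positivity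
    rw [pvLoopA_unfold, if_neg (by omega),
      show (2 : Nat) ^ (k + 1) / 2 = 2 ^ k by rw [pow_succ]; exact Nat.mul_div_cancel _ (by norm_num)]
    obtain ⟨hL, hmid, hout⟩ := pvLevelA_spec l hh (k + 1) hk t hlen hhyp
    have hseed : ∀ j, 2 ^ (k + 1) ≤ j → j < 2 ^ (hh + 1) →
        (pvLevelA (2 ^ (k + 1)) t)[j]? = some (pvTj l hh j) := by
      intro j hj1 hj2
      by_cases hj : j < 2 ^ (k + 1 + 1)
      · exact hmid j hj1 hj
      · rw [hout j (Or.inr (by omega))]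
        exact hhyp j (by omega) hj2
    obtain ⟨iL, imid, i0⟩ := ih (pvLevelA (2 ^ (k + 1)) t) (by omega) hL hseed
    exact ⟨iL, imid, i0.trans (hout 0 (Or.inl (by omega)))⟩

lemma pvA_char (nodes : List Int) (hne : nodes ≠ []) : ∀ q,
    (infalte_tree nodes)[q]? =
      if q = 0 then some [] else
        if q < 2 ^ (Nat.clog 2 nodes.length + 1) then
          some (pvTj nodes (Nat.clog 2 nodes.length) q) else none := by
  intro q
  have hn1 : 0 < nodes.length := List.length_pos_of_ne_nil hne
  have hnle : nodes.length ≤ 2 ^ Nat.clog 2 nodes.length := Nat.le_pow_clog (by norm_num) _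
  simp only [infalte_tree]
  rw [show (1 : Nat) <<< Nat.clog 2 nodes.length = 2 ^ Nat.clog 2 nodes.length from by
        rw [Nat.shiftLeft_eq]; ring,
      show (2 : Nat) <<< Nat.clog 2 nodes.length = 2 ^ (Nat.clog 2 nodes.length + 1) from by
        rw [Nat.shiftLeft_eq, pow_succ]; ring,
      show (2 ^ Nat.clog 2 nodes.length) >>> 1 = 2 ^ Nat.clog 2 nodes.length / 2 from by
        rw [Nat.shiftRight_eq_div_pow, pow_one]]
  set n := nodes.length with hn
  set hh := Nat.clog 2 n with hhh
  have hpow : (2 : Nat) ^ (hh + 1) = 2 * 2 ^ hh := by rw [pow_succ]; ring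
  have hp0 : 0 < 2 ^ hh := by positivity
  have hinit := pvInit (2 ^ hh) nodes 0 (List.replicate (2 ^ (hh + 1)) ([] : List Int))
    (by rw [List.length_replicate]; omega)
  simp only [Nat.add_zero, ← hn] at hinit
  have hlen1 : ((nodes.zipIdx).foldl (fun t p => t.set (2 ^ hh + p.2) [p.1])
      (List.replicate (2 ^ (hh + 1)) ([] : List Int))).length = 2 ^ (hh + 1) :=
    (pvFoldLen (nodes.zipIdx) (fun p => 2 ^ hh + p.2) (fun _ p => [p.1]) _).trans (by simp)
  rcases Nat.eq_zero_or_pos hh with hh0 | hhpos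
  · have hn1' : n = 1 := by rw [hh0] at hnle; simpa using (by omega : n = 1)
    rw [hh0] at hinit ⊢
    rw [show (2 : Nat) ^ 0 / 2 = 0 from by norm_num, pvLoopA_unfold, if_pos rfl]
    simp only [pow_zero] at hinit ⊢
    by_cases hq0 : q = 0
    · subst hq0
      rw [if_pos rfl, hinit 0, if_neg (by omega), List.getElem?_replicate, if_pos (by positivity)]
    · rw [if_neg hq0]
      by_cases hq1 : q = 1
      · subst hq1
        rw [if_pos (by norm_num), hinit 1, if_pos (by omega)]
        have hTj := pvTj_leaf nodes 0 0 (by norm_num)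
        simp only [pow_zero, Nat.add_zero] at hTj
        rw [hTj, dif_pos (by omega)]
        rw [show (1 : Nat) - 1 = 0 from rfl, List.getElem?_eq_getElem (by omega)]
        rfl
      · rw [if_neg (by omega), hinit q, if_neg (by omega), List.getElem?_replicate,
          if_neg (by omega)]
  · have hd2 : 2 ^ hh / 2 = 2 ^ (hh - 1) := by
      have hd : 2 ^ hh = 2 ^ (hh - 1) * 2 := by rw [← pow_succ]; congr 1; omega
      rw [hd]; exact Nat.mul_div_cancel _ two_pos
    rw [hd2]
    have hseed : ∀ j, 2 ^ ((hh - 1) + 1) ≤ j → j < 2 ^ (hh + 1) →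
        ((nodes.zipIdx).foldl (fun t p => t.set (2 ^ hh + p.2) [p.1])
          (List.replicate (2 ^ (hh + 1)) ([] : List Int)))[j]? = some (pvTj nodes hh j) := by
      intro j hj1 hj2
      rw [show (hh - 1) + 1 = hh from by omega] at hj1
      rw [hinit j]
      have hsj : j - 2 ^ hh < 2 ^ hh := by omega
      have hTj := pvTj_leaf nodes hh (j - 2 ^ hh) hsj
      rw [show 2 ^ hh + (j - 2 ^ hh) = j from by omega] at hTj
      rw [hTj]
      by_cases hsl : j - 2 ^ hh < n
      · rw [if_pos (by omega), dif_pos hsl, List.getElem?_eq_getElem hsl]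
        rfl
      · rw [if_neg (by omega), dif_neg hsl, List.getElem?_replicate, if_pos (by omega)]
    obtain ⟨lL, lmid, l0⟩ := pvLoop_inv nodes hh (hh - 1) _ (by omega) hlen1 hseed
    by_cases hq0 : q = 0
    · subst hq0
      rw [if_pos rfl, l0, hinit 0, if_neg (by omega), List.getElem?_replicate,
        if_pos (by positivity)]
    · rw [if_neg hq0]
      by_cases hql : q < 2 ^ (hh + 1)
      · rw [if_pos hql]
        exact lmid q (by omega) hql
      · rw [if_neg hql]
        exact List.getElem?_eq_none (by rw [lL]; omega)

lemma pvPyRangeNat : ∀ (m : Nat) (a : Int),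
    PySem.List.pyRange a (a + m) = (List.range m).map (fun (i : Nat) => a + (i : Int)) := by
  intro m
  induction m with
  | zero =>
    intro a
    rw [List.range_zero, List.map_nil, List.eq_nil_iff_forall_not_mem]
    intro x hx
    rw [PySem.List.mem_pyRange_one] at hx
    omega
  | succ m ih =>
    intro a
    rw [show a + ((m + 1 : Nat) : Int) = (a + 1) + (m : Nat) from by push_cast; ring]
    rw [PySem.List.pyRange_one_cons (by have := Int.natCast_nonneg m; omega)]
    rw [ih (a + 1), List.range_succ_eq_map, List.map_cons, List.map_map]
    congr 1
    · simp
    · apply List.map_congr_left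
      intro i _
      simp only [Function.comp_apply, Nat.succ_eq_add_one]
      push_cast
      ring

lemma pvB_step (nodes : List Int) (hh : Nat) (j : Int) (h1 : 1 ≤ j) (h2 : j < 2 ^ (hh + 1)) :
    PySem.List.sorted (PySem.List.slice nodes
        (some ((j <<< (hh - (PySem.Int.bitLength j - 1))) - ((1 <<< hh : Nat) : Int)))
        (some (min (((j + 1) <<< (hh - (PySem.Int.bitLength j - 1))) - ((1 <<< hh : Nat) : Int))
          (nodes.length : Int))))
      (fun x => x) = pvTj nodes hh j.toNat := by
  obtain ⟨jn, rfl⟩ : ∃ k : Nat, j = (k : Int) := ⟨j.toNat, by omega⟩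
  have hjn1 : 1 ≤ jn := by exact_mod_cast h1
  have hc2 : ((2 ^ (hh + 1) : Nat) : Int) = (2 : Int) ^ (hh + 1) := by push_cast; ring
  have hjn2 : jn < 2 ^ (hh + 1) := by
    have := h2; rw [← hc2] at this; exact_mod_cast this
  set bl := PySem.Int.bitLength ((jn : Nat) : Int) with hbl
  have hlt : jn < 2 ^ bl := by
    have := PySem.Int.lt_two_pow_bitLength ((jn : Nat) : Int); simpa using this
  have hle : 2 ^ (bl - 1) ≤ jn := by
    have := PySem.Int.two_pow_bitLength_le ((jn : Nat) : Int)
      (by exact_mod_cast (by omega : jn ≠ 0))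
    simpa using this
  have hbl1 : 1 ≤ bl := by
    by_contra h
    have hbl0 : bl = 0 := by omega
    rw [hbl0] at hlt; simp at hlt; omega
  have hblhh : bl - 1 ≤ hh := by
    by_contra h
    have : (2 : Nat) ^ (hh + 1) ≤ 2 ^ (bl - 1) := Nat.pow_le_pow_right (by norm_num) (by omega)
    omega
  have hge : 2 ^ hh ≤ jn * 2 ^ (hh - (bl - 1)) :=
    calc 2 ^ hh = 2 ^ (bl - 1) * 2 ^ (hh - (bl - 1)) := by rw [← pow_add]; congr 1; omega
    _ ≤ jn * 2 ^ (hh - (bl - 1)) := Nat.mul_le_mul hle (le_refl _)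
  have hge2 : 2 ^ hh ≤ (jn + 1) * 2 ^ (hh - (bl - 1)) :=
    le_trans hge (Nat.mul_le_mul (by omega) (le_refl _))
  simp only [Int.shiftLeft_eq]
  simp only [show ((1 <<< hh : Nat) : Int) = ((2 ^ hh : Nat) : Int) from by
    rw [Nat.shiftLeft_eq, one_mul]]
  have e1 : (jn : Int) * 2 ^ (hh - (bl - 1)) - ((2 ^ hh : Nat) : Int)
      = ((jn * 2 ^ (hh - (bl - 1)) - 2 ^ hh : Nat) : Int) := by
    rw [Nat.cast_sub hge]; push_cast; ring
  have e2 : ((jn : Int) + 1) * 2 ^ (hh - (bl - 1)) - ((2 ^ hh : Nat) : Int)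
      = (((jn + 1) * 2 ^ (hh - (bl - 1)) - 2 ^ hh : Nat) : Int) := by
    rw [Nat.cast_sub hge2]; push_cast; ring
  rw [e1, e2]
  have hmin : ∀ (x y : Nat), min ((x : Nat) : Int) ((y : Nat) : Int) = ((min x y : Nat) : Int) :=
    fun x y => by omega
  rw [hmin]
  rw [PySem.List.slice_toNat nodes (Int.natCast_nonneg _) (Int.natCast_nonneg _)]
  simp only [Int.toNat_natCast]
  unfold pvTj pvSlice
  simp only [← hbl]

lemma pvB_char (nodes : List Int) (hne : nodes ≠ []) :
    infalte_tree_alt nodes =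
      [] :: (List.range (2 ^ (Nat.clog 2 nodes.length + 1) - 1)).map
        (fun k => pvTj nodes (Nat.clog 2 nodes.length) (k + 1)) := by
  have hn1 : 0 < nodes.length := List.length_pos_of_ne_nil hne
  simp only [infalte_tree_alt]
  rw [if_neg (by omega), pvHeightEq nodes.length hn1]
  set hh := Nat.clog 2 nodes.length with hhh
  have hb : (2 : Int) * ((1 <<< hh : Nat) : Int) = 1 + ((2 ^ (hh + 1) - 1 : Nat) : Int) := by
    have h1 : (1 : Nat) ≤ 2 ^ (hh + 1) := Nat.one_le_two_pow
    rw [Nat.cast_sub h1]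
    push_cast [Nat.shiftLeft_eq, pow_succ]
    ring
  rw [hb, pvPyRangeNat (2 ^ (hh + 1) - 1) 1, List.foldl_map]
  refine Eq.trans (PySem.List.foldl_congr_mem _ _
    (fun t k => t ++ [pvTj nodes hh (k + 1)]) _ ?_) ?_
  · intro acc k hk
    rw [List.mem_range] at hk
    simp only []
    have hc2 : ((2 ^ (hh + 1) : Nat) : Int) = (2 : Int) ^ (hh + 1) := by push_cast; ring
    have hstep := pvB_step nodes hh (1 + (k : Int)) (by omega)
      (by rw [← hc2]; have := hk; omega)
    rw [hstep, show (1 + (k : Int)).toNat = k + 1 from by omega]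
  · rw [PySem.List.foldl_append_singleton_eq_map]
    rfl

lemma pvMain (nodes : List Int) (hne : nodes ≠ []) :
    infalte_tree nodes = infalte_tree_alt nodes := by
  apply List.ext_getElem?
  intro q
  rw [pvA_char nodes hne q, pvB_char nodes hne]
  by_cases hq0 : q = 0
  · subst hq0
    rw [if_pos rfl]
    rfl
  · rw [if_neg hq0]
    obtain ⟨p, rfl⟩ : ∃ p, q = p + 1 := ⟨q - 1, by omega⟩
    rw [List.getElem?_cons_succ, List.getElem?_map]
    by_cases hql : p + 1 < 2 ^ (Nat.clog 2 nodes.length + 1)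
    · rw [if_pos hql, List.getElem?_range (by omega)]
      rfl
    · rw [if_neg hql, show (List.range (2 ^ (Nat.clog 2 nodes.length + 1) - 1))[p]? = none from
        List.getElem?_eq_none (by rw [List.length_range]; omega)]
      rfl

-- ===== VERDICT (by name: the statement is the Claim_ definition above) =====
theorem infalte_tree_spec : Claim_equal_infalte_tree := by
  intro nodes _ hpre
  unfold Spec_infalte_tree
  exact pvMain nodes hpre
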